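-- pv_equiv track=rewrite | github.com/Jail07/Algorythms | CodeForce/B.py | can_reach_target
-- ===== SOURCE A (Python) =====
-- def can_reach_target(instructions, x, y):
--     # Simulate one full sequence
--     positions = set()
--     current_x, current_y = 0, 0
--     positions.add((current_x, current_y))
--
--     for move in instructions:
--         if move == 'U':
--             current_y += 1
--         elif move == 'D':
--             current_y -= 1
--         elif move == 'L':
--             current_x -= 1
--         elif move == 'R':
--             current_x += 1
--         positions.add((current_x, current_y))
--
--     # Compute net change after one full sequence
--     dx, dy = current_x, current_y
--
--     # Check if target is reachable
--     for (x0, y0) in positions: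
--         if dx == 0 and dy == 0:
--             # Robot returns to (0, 0) after each sequence
--             if x0 == x and y0 == y:
--                 return True
--         else:
--             # Solve x = x0 + k * dx, y = y0 + k * dy
--             if dx == 0:
--                 if x != x0:
--                     continue
--                 if dy == 0:
--                     if y != y0:
--                         continue
--                     else:
--                         return True
--                 else:
--                     if (y - y0) % dy == 0 and (y - y0) // dy >= 0:
--                         return True
--             else:
--                 if (x - x0) % dx != 0:
--                     continue
--                 k = (x - x0) // dx
--                 if k < 0:
--                     continue
--                 if y == y0 + k * dy:
--                     return True
--     return False
-- ===== SOURCE B (Python) =====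
-- def can_reach_target(instructions, x, y):
--     # Walk once recording all prefix positions and the net displacement.
--     dx, dy = 0, 0
--     pref = [(0, 0)]
--     for move in instructions:
--         if move == 'U':
--             dy += 1
--         elif move == 'D':
--             dy -= 1
--         elif move == 'L':
--             dx -= 1
--         elif move == 'R':
--             dx += 1
--         pref.append((dx, dy))
--
--     if dx == 0 and dy == 0:
--         # The robot just loops over its prefix positions.
--         return (x, y) in pref
--
--     # Index each prefix position by (congruence class of the moving coordinate,
--     # cross-product invariant), keeping the extremal moving coordinate per key;
--     # the target is reachable iff one O(1) lookup finds an extremum on the right side.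
--     if dx != 0:
--         sgn = dx
--         items = [((x0 % dx, dx * y0 - dy * x0), x0) for (x0, y0) in pref]
--         query = (x % dx, dx * y - dy * x)
--         target = x
--     else:
--         sgn = dy
--         items = [((y0 % dy, x0), y0) for (x0, y0) in pref]
--         query = (y % dy, x)
--         target = y
--
--     best = {}
--     for (kk, c) in items:
--         if kk not in best or (c < best[kk] if sgn > 0 else c > best[kk]):
--             best[kk] = c
--
--     if query not in best:
--         return False
--     return best[query] <= target if sgn > 0 else best[query] >= target
-- ===== Notes on version B (the rewrite author's own statement) =====
-- stated objective: alternative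
-- what changed: B replaces A's per-position linear-equation solve over a stored position set by a hash index: it keys every prefix position by (congruence class of the moving coordinate, cross-product invariant dx*y0-dy*x0), keeps only the extremal moving coordinate per key in a dict, and decides reachability with a single O(1) lookup and one comparison (plain list membership when dx=dy=0).
import Mathlib
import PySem

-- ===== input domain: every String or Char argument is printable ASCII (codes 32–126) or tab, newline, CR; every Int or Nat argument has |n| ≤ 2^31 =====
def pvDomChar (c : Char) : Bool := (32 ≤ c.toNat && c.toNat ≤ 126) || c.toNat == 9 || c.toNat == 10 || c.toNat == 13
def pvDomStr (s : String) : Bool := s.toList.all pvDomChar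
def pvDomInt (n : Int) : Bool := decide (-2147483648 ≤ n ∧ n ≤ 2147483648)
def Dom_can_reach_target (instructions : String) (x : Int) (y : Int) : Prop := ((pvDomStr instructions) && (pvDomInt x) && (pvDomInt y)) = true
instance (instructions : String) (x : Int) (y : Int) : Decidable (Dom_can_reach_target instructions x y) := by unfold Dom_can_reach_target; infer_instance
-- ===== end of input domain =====

-- B indexes the prefix positions in a dict keyed by (congruence class, cross-product invariant)
-- keeping one extremal coordinate per key, and answers by a single lookup (objective: alternative, same O(n)).

-- ===== PORT A =====

-- one move of the simulation ladder (shared: both Pythons update the position with the same branch ladder)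
def pvStep (p : Int × Int) (move : Char) : Int × Int :=
  if move = 'U' then (p.1, p.2 + 1)
  else if move = 'D' then (p.1, p.2 - 1)
  else if move = 'L' then (p.1 - 1, p.2)
  else if move = 'R' then (p.1 + 1, p.2)
  else p

-- the body of A's second loop for one stored position (each 'continue' = false)
def pvCheckA (dx dy x y : Int) (p : Int × Int) : Bool :=
  if dx = 0 ∧ dy = 0 then
    decide (p.1 = x ∧ p.2 = y)
  else if dx = 0 then
    if x ≠ p.1 then false
    else if dy = 0 then (if y ≠ p.2 then false else true)
    else decide (PySem.Int.mod (y - p.2) dy = 0 ∧ 0 ≤ PySem.Int.floordiv (y - p.2) dy)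
  else
    if PySem.Int.mod (x - p.1) dx ≠ 0 then false
    else
      let k := PySem.Int.floordiv (x - p.1) dx
      if k < 0 then false
      else decide (y = p.2 + k * dy)

-- A's second loop: first position passing the check returns True
def pvScanA (dx dy x y : Int) : List (Int × Int) → Bool
  | [] => false
  | p :: ps => if pvCheckA dx dy x y p then true else pvScanA dx dy x y ps

def can_reach_target (instructions : String) (x : Int) (y : Int) : Bool :=
  let st := instructions.toList.foldl
    (fun (acc : PySem.Set (Int × Int) × (Int × Int)) move =>
      let p := pvStep acc.2 move
      (PySem.Set.add acc.1 p, p))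
    (PySem.Set.add PySem.Set.empty ((0 : Int), (0 : Int)), ((0 : Int), (0 : Int)))
  pvScanA st.2.1 st.2.2 x y st.1

-- ===== PORT B =====

-- B's dict-building loop: per key keep the least (sgn > 0) / greatest (else) coordinate
def pvBest (sgn : Int) (items : List ((Int × Int) × Int)) : PySem.Dict (Int × Int) Int :=
  items.foldl
    (fun d kc =>
      match d.get? kc.1 with
      | none => d.insert kc.1 kc.2
      | some b => if (if 0 < sgn then kc.2 < b else b < kc.2) then d.insert kc.1 kc.2 else d)
    PySem.Dict.empty

def can_reach_target_alt (instructions : String) (x : Int) (y : Int) : Bool :=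
  let st := instructions.toList.foldl
    (fun (acc : (Int × Int) × List (Int × Int)) move =>
      let d := pvStep acc.1 move
      (d, acc.2 ++ [d]))
    (((0 : Int), (0 : Int)), [((0 : Int), (0 : Int))])
  let dx := st.1.1
  let dy := st.1.2
  let pref := st.2
  if dx = 0 ∧ dy = 0 then decide ((x, y) ∈ pref)
  else
    let sgn := if dx ≠ 0 then dx else dy
    let items := if dx ≠ 0 then
        pref.map (fun p => ((PySem.Int.mod p.1 dx, dx * p.2 - dy * p.1), p.1))
      else
        pref.map (fun p => ((PySem.Int.mod p.2 dy, p.1), p.2))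
    let query : Int × Int := if dx ≠ 0 then (PySem.Int.mod x dx, dx * y - dy * x) else (PySem.Int.mod y dy, x)
    let target := if dx ≠ 0 then x else y
    match (pvBest sgn items).get? query with
    | none => false
    | some c => if 0 < sgn then decide (c ≤ target) else decide (target ≤ c)

-- ===== PRECONDITION & SPEC =====
def Spec_can_reach_target (instructions : String) (x : Int) (y : Int) (out : Bool) : Prop := out = can_reach_target_alt instructions x y
instance (instructions : String) (x : Int) (y : Int) (out : Bool) : Decidable (Spec_can_reach_target instructions x y out) := by unfold Spec_can_reach_target; infer_instance

-- ===== CLAIM (what is proved, stated in full; the proofs are below) =====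
def Claim_equal_can_reach_target : Prop := ∀ (instructions : String) (x : Int) (y : Int), Dom_can_reach_target instructions x y → Spec_can_reach_target instructions x y (can_reach_target instructions x y)

-- ===== LEMMAS AND PROOFS =====

-- the list of positions visited while walking l from p (excluding p itself)
def pvVisited : Int × Int → List Char → List (Int × Int)
  | _, [] => []
  | p, c :: cs => pvStep p c :: pvVisited (pvStep p c) cs

-- one step of the per-key extremum, as an Option fold
def pvStepCmp (sgn : Int) (o : Option Int) (c : Int) : Option Int :=
  match o with
  | none => some c
  | some b => if (if 0 < sgn then c < b else b < c) then some c else some b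

theorem pvBoolExt {a b : Bool} (h : a = true ↔ b = true) : a = b := by
  cases a <;> cases b <;> simp_all

theorem pvFoldA_snd (l : List Char) (s : PySem.Set (Int × Int)) (p : Int × Int) :
    (l.foldl (fun (acc : PySem.Set (Int × Int) × (Int × Int)) move =>
      (PySem.Set.add acc.1 (pvStep acc.2 move), pvStep acc.2 move)) (s, p)).2
    = l.foldl pvStep p := by
  induction l generalizing s p with
  | nil => rfl
  | cons c cs ih => simp [List.foldl, ih]

theorem pvFoldA_mem (l : List Char) (s : PySem.Set (Int × Int)) (p q : Int × Int) :
    (q ∈ (l.foldl (fun (acc : PySem.Set (Int × Int) × (Int × Int)) move =>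
      (PySem.Set.add acc.1 (pvStep acc.2 move), pvStep acc.2 move)) (s, p)).1)
    ↔ (q ∈ s ∨ q ∈ pvVisited p l) := by
  induction l generalizing s p with
  | nil => simp [pvVisited]
  | cons c cs ih =>
      simp only [List.foldl, pvVisited, ih, PySem.Set.mem_add, List.mem_cons]
      tauto

theorem pvFoldB (l : List Char) (p : Int × Int) (L : List (Int × Int)) :
    l.foldl (fun (acc : (Int × Int) × List (Int × Int)) move =>
      (pvStep acc.1 move, acc.2 ++ [pvStep acc.1 move])) (p, L)
    = (l.foldl pvStep p, L ++ pvVisited p l) := by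
  induction l generalizing p L with
  | nil => simp [pvVisited]
  | cons c cs ih => simp [List.foldl, pvVisited, ih]

theorem pvScanA_iff (dx dy x y : Int) (l : List (Int × Int)) :
    pvScanA dx dy x y l = true ↔ ∃ q ∈ l, pvCheckA dx dy x y q = true := by
  induction l with
  | nil => simp [pvScanA]
  | cons p ps ih =>
      by_cases h : pvCheckA dx dy x y p = true
      · simp [pvScanA, h]
      · simp [pvScanA, h, ih]

-- the dict fold, looked up at one key, is the Option fold over the values filed under that key
theorem pvBest_get? (sgn : Int) (items : List ((Int × Int) × Int)) (d : PySem.Dict (Int × Int) Int) (k : Int × Int) :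
    (items.foldl
      (fun d kc =>
        match d.get? kc.1 with
        | none => d.insert kc.1 kc.2
        | some b => if (if 0 < sgn then kc.2 < b else b < kc.2) then d.insert kc.1 kc.2 else d)
      d).get? k
    = ((items.filter (fun kc => kc.1 = k)).map Prod.snd).foldl (pvStepCmp sgn) (d.get? k) := by
  induction items generalizing d with
  | nil => rfl
  | cons kc rest ih =>
      simp only [List.foldl, List.filter]
      by_cases hk : kc.1 = k
      · simp only [hk, decide_true]
        rw [ih]
        rcases hg : d.get? kc.1 with _ | b
        · simp only [List.map, List.foldl, pvStepCmp, hk ▸ hg, PySem.Dict.get?_insert_self]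
        · by_cases hc : (if 0 < sgn then kc.2 < b else b < kc.2)
          · simp only [hc, if_true, List.map, List.foldl, pvStepCmp, hk ▸ hg, PySem.Dict.get?_insert_self]
          · simp only [hc, if_false, List.map, List.foldl, pvStepCmp, hk ▸ hg]
      · simp only [hk, decide_false]
        rw [ih]
        rcases hg : d.get? kc.1 with _ | b
        · dsimp only
          rw [PySem.Dict.get?_insert, if_neg (fun h => hk h.symm)]
        · dsimp only
          by_cases hc : (if 0 < sgn then kc.2 < b else b < kc.2)
          · simp only [hc, if_true]
            rw [PySem.Dict.get?_insert, if_neg (fun h => hk h.symm)]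
          · simp only [hc, if_false]

-- the extremum fold passes the one-sided test iff some contributing value does
theorem pvFoldCmp_iff (sgn t : Int) (l : List Int) (o : Option Int) :
    (match l.foldl (pvStepCmp sgn) o with
     | none => false
     | some c => if 0 < sgn then decide (c ≤ t) else decide (t ≤ c)) = true
    ↔ ((∃ c, o = some c ∧ (if 0 < sgn then c ≤ t else t ≤ c)) ∨
       ∃ c ∈ l, (if 0 < sgn then c ≤ t else t ≤ c)) := by
  induction l generalizing o with
  | nil =>
      rcases o with _ | c
      · simp
      · by_cases hs : 0 < sgn <;> simp [hs]
  | cons a rest ih =>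
      simp only [List.foldl, ih, List.mem_cons]
      rcases o with _ | b
      · simp only [pvStepCmp]
        constructor
        · rintro (⟨c, hc, h⟩ | h)
          · exact Or.inr ⟨a, Or.inl (by injection hc with h'; omega), by injection hc with h'; exact h' ▸ h⟩
          · obtain ⟨c, hc, h⟩ := h
            exact Or.inr ⟨c, Or.inr hc, h⟩
        · rintro (⟨c, hc, h⟩ | ⟨c, hc | hc, h⟩)
          · exact absurd hc (by simp)
          · exact Or.inl ⟨a, rfl, hc ▸ h⟩
          · exact Or.inr ⟨c, hc, h⟩
      · simp only [pvStepCmp]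
        by_cases hcmp : (if 0 < sgn then a < b else b < a)
        · rw [if_pos hcmp]
          constructor
          · rintro (⟨c, hc, h⟩ | h)
            · exact Or.inr ⟨a, Or.inl (by injection hc with h'; omega), by injection hc with h'; exact h' ▸ h⟩
            · obtain ⟨c, hc, h⟩ := h
              exact Or.inr ⟨c, Or.inr hc, h⟩
          · rintro (⟨c, hc, h⟩ | ⟨c, hc | hc, h⟩)
            · refine Or.inl ⟨a, rfl, ?_⟩
              injection hc with h'
              subst h'
              by_cases hs : 0 < sgn <;> simp [hs] at hcmp h ⊢ <;> omega
            · exact Or.inl ⟨a, rfl, hc ▸ h⟩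
            · exact Or.inr ⟨c, hc, h⟩
        · rw [if_neg hcmp]
          constructor
          · rintro (⟨c, hc, h⟩ | h)
            · exact Or.inl ⟨b, rfl, by injection hc with h'; exact h' ▸ h⟩
            · obtain ⟨c, hc, h⟩ := h
              exact Or.inr ⟨c, Or.inr hc, h⟩
          · rintro (⟨c, hc, h⟩ | ⟨c, hc | hc, h⟩)
            · exact Or.inl ⟨b, rfl, by injection hc with h'; exact h' ▸ h⟩
            · refine Or.inl ⟨b, rfl, ?_⟩
              subst hc
              by_cases hs : 0 < sgn <;> simp [hs] at hcmp h ⊢ <;> omega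
            · exact Or.inr ⟨c, hc, h⟩

-- same remainder at the divisor's sign ↔ the divisor divides the difference
theorem pvModCong (a a' b : Int) (hb : b ≠ 0) :
    PySem.Int.mod a b = PySem.Int.mod a' b ↔ b ∣ (a - a') := by
  have h1 := PySem.Int.floordiv_mul_add_mod a b
  have h2 := PySem.Int.floordiv_mul_add_mod a' b
  constructor
  · intro h
    exact ⟨PySem.Int.floordiv a b - PySem.Int.floordiv a' b, by linear_combination h2 - h1 + h⟩
  · rintro ⟨t, ht⟩
    have hd : b ∣ (PySem.Int.mod a b - PySem.Int.mod a' b) :=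
      ⟨t - (PySem.Int.floordiv a b - PySem.Int.floordiv a' b), by linear_combination h1 - h2 + ht⟩
    have hz : PySem.Int.mod a b - PySem.Int.mod a' b = 0 := by
      refine Int.eq_zero_of_dvd_of_natAbs_lt_natAbs hd ?_
      rcases lt_or_gt_of_ne hb with hneg | hpos
      · have b1 := PySem.Int.mod_neg_bounds a hneg
        have b2 := PySem.Int.mod_neg_bounds a' hneg
        omega
      · have b1 := PySem.Int.mod_nonneg a hpos
        have b2 := PySem.Int.mod_lt a hpos
        have b3 := PySem.Int.mod_nonneg a' hpos
        have b4 := PySem.Int.mod_lt a' hpos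
        omega
    omega

theorem pvFloordivMul (b t : Int) (hb : b ≠ 0) : PySem.Int.floordiv (b * t) b = t := by
  have h := PySem.Int.floordiv_mul_add_mod (b * t) b
  have hm : PySem.Int.mod (b * t) b = 0 := (PySem.Int.mod_eq_zero_iff_dvd _ _).mpr ⟨t, rfl⟩
  have : PySem.Int.floordiv (b * t) b * b = t * b := by linarith [h, hm, mul_comm b t]
  exact mul_right_cancel₀ hb this

-- A's check, rewritten as "key matches ∧ coordinate on the reachable side", when dx ≠ 0
theorem pvCheck_dx (dx dy x y x0 y0 : Int) (hdx : dx ≠ 0) :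
    pvCheckA dx dy x y (x0, y0) = true ↔
      ((PySem.Int.mod x0 dx = PySem.Int.mod x dx ∧ dx * y0 - dy * x0 = dx * y - dy * x) ∧
        (if 0 < dx then x0 ≤ x else x ≤ x0)) := by
  unfold pvCheckA
  rw [if_neg (fun h => hdx h.1), if_neg hdx]
  by_cases hm : PySem.Int.mod (x - x0) dx = 0
  · rw [if_neg (not_not_intro hm)]
    obtain ⟨t, ht⟩ := (PySem.Int.mod_eq_zero_iff_dvd _ _).mp hm
    have hf : PySem.Int.floordiv (x - x0) dx = t := by rw [ht]; exact pvFloordivMul dx t hdx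
    show (if PySem.Int.floordiv (x - x0) dx < 0 then false
          else decide (y = y0 + PySem.Int.floordiv (x - x0) dx * dy)) = true ↔ _
    rw [hf]
    have hcong : PySem.Int.mod x0 dx = PySem.Int.mod x dx := by
      rw [pvModCong _ _ _ hdx]
      exact ⟨-t, by rw [mul_neg]; linarith⟩
    by_cases hk : t < 0
    · rw [if_pos hk]
      simp only [Bool.false_eq_true, false_iff]
      rintro ⟨⟨-, -⟩, hside⟩
      rcases lt_or_gt_of_ne hdx with hneg | hpos
      · rw [if_neg (by omega)] at hside
        nlinarith
      · rw [if_pos hpos] at hside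
        nlinarith
    · rw [if_neg hk]
      simp only [decide_eq_true_eq]
      have ht0 : (0 : Int) ≤ t := by omega
      constructor
      · intro hy
        refine ⟨⟨hcong, by linear_combination (-dx) * hy + dy * ht⟩, ?_⟩
        rcases lt_or_gt_of_ne hdx with hneg | hpos
        · rw [if_neg (by omega)]
          nlinarith
        · rw [if_pos hpos]
          nlinarith
      · rintro ⟨⟨-, hcross⟩, -⟩
        have hz : dx * (y - y0 - t * dy) = 0 := by linear_combination dy * ht - hcross
        have := (mul_eq_zero.mp hz).resolve_left hdx
        linarith
  · rw [if_pos hm]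
    simp only [Bool.false_eq_true, false_iff]
    rintro ⟨⟨hcong, -⟩, -⟩
    obtain ⟨t, ht⟩ := (pvModCong x0 x dx hdx).mp hcong
    exact hm ((PySem.Int.mod_eq_zero_iff_dvd (x - x0) dx).mpr ⟨-t, by rw [mul_neg]; linarith⟩)

-- A's check when dx = 0 and dy ≠ 0
theorem pvCheck_dy (dy x y x0 y0 : Int) (hdy : dy ≠ 0) :
    pvCheckA 0 dy x y (x0, y0) = true ↔
      ((PySem.Int.mod y0 dy = PySem.Int.mod y dy ∧ x0 = x) ∧
        (if 0 < dy then y0 ≤ y else y ≤ y0)) := by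
  unfold pvCheckA
  rw [if_neg (fun h => hdy h.2), if_pos rfl]
  by_cases hx : x ≠ x0
  · rw [if_pos hx]
    simp only [Bool.false_eq_true, false_iff]
    rintro ⟨⟨-, hx0⟩, -⟩
    exact hx hx0.symm
  · rw [if_neg hx, if_neg hdy]
    have hx' : x0 = x := by omega
    by_cases hm : PySem.Int.mod (y - y0) dy = 0
    · obtain ⟨t, ht⟩ := (PySem.Int.mod_eq_zero_iff_dvd _ _).mp hm
      have hf : PySem.Int.floordiv (y - y0) dy = t := by rw [ht]; exact pvFloordivMul dy t hdy
      have hcong : PySem.Int.mod y0 dy = PySem.Int.mod y dy := by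
        rw [pvModCong _ _ _ hdy]
        exact ⟨-t, by rw [mul_neg]; linarith⟩
      simp only [hm, hf, decide_eq_true_eq, true_and]
      constructor
      · intro ht0
        refine ⟨⟨hcong, hx'⟩, ?_⟩
        rcases lt_or_gt_of_ne hdy with hneg | hpos
        · rw [if_neg (by omega)]
          nlinarith
        · rw [if_pos hpos]
          nlinarith
      · rintro ⟨-, hside⟩
        rcases lt_or_gt_of_ne hdy with hneg | hpos
        · rw [if_neg (by omega)] at hside
          nlinarith
        · rw [if_pos hpos] at hside
          nlinarith
    · simp only [hm, false_and, decide_false, Bool.false_eq_true, false_iff]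
      rintro ⟨⟨hcong, -⟩, -⟩
      obtain ⟨t, ht⟩ := (pvModCong y0 y dy hdy).mp hcong
      exact hm ((PySem.Int.mod_eq_zero_iff_dvd (y - y0) dy).mpr ⟨-t, by rw [mul_neg]; linarith⟩)

theorem pvMain (s : String) (x y : Int) :
    can_reach_target s x y = can_reach_target_alt s x y := by
  apply pvBoolExt
  simp only [can_reach_target, can_reach_target_alt]
  rw [pvFoldB]
  simp only [List.singleton_append]
  have hsnd := pvFoldA_snd s.toList (PySem.Set.add PySem.Set.empty ((0 : Int), (0 : Int))) ((0 : Int), (0 : Int))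
  rw [hsnd]
  set P := s.toList.foldl pvStep ((0 : Int), (0 : Int)) with hP
  set dx : Int := P.1
  set dy : Int := P.2
  set pref : List (Int × Int) := ((0 : Int), (0 : Int)) :: pvVisited ((0 : Int), (0 : Int)) s.toList with hpref
  have hmem : ∀ q : Int × Int,
      q ∈ (s.toList.foldl (fun (acc : PySem.Set (Int × Int) × (Int × Int)) move =>
        (PySem.Set.add acc.1 (pvStep acc.2 move), pvStep acc.2 move))
        (PySem.Set.add PySem.Set.empty ((0 : Int), (0 : Int)), ((0 : Int), (0 : Int)))).1
      ↔ q ∈ pref := by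
    intro q
    rw [pvFoldA_mem, hpref, List.mem_cons]
    constructor
    · rintro (hq | hq)
      · left; simpa [PySem.Set.empty, PySem.Set.add] using hq
      · exact Or.inr hq
    · rintro (hq | hq)
      · left; simp [PySem.Set.empty, PySem.Set.add, hq]
      · exact Or.inr hq
  rw [pvScanA_iff]
  have hA : (∃ q ∈ (s.toList.foldl (fun (acc : PySem.Set (Int × Int) × (Int × Int)) move =>
        (PySem.Set.add acc.1 (pvStep acc.2 move), pvStep acc.2 move))
        (PySem.Set.add PySem.Set.empty ((0 : Int), (0 : Int)), ((0 : Int), (0 : Int)))).1,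
        pvCheckA dx dy x y q = true)
      ↔ ∃ q ∈ pref, pvCheckA dx dy x y q = true := by
    constructor
    · rintro ⟨q, hq, h⟩; exact ⟨q, (hmem q).mp hq, h⟩
    · rintro ⟨q, hq, h⟩; exact ⟨q, (hmem q).mpr hq, h⟩
  rw [hA]
  by_cases h00 : dx = 0 ∧ dy = 0
  · rw [if_pos h00]
    simp only [decide_eq_true_eq]
    constructor
    · rintro ⟨q, hq, h⟩
      unfold pvCheckA at h
      rw [if_pos h00] at h
      obtain ⟨h1, h2⟩ := of_decide_eq_true h
      have hqe : q = (x, y) := by cases q; simp_all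
      exact hqe ▸ hq
    · intro h
      refine ⟨(x, y), h, ?_⟩
      unfold pvCheckA
      rw [if_pos h00]
      exact decide_eq_true ⟨rfl, rfl⟩
  · rw [if_neg h00]
    by_cases hdx : dx = 0
    · have hdy : dy ≠ 0 := fun h => h00 ⟨hdx, h⟩
      simp only [hdx, ne_eq, not_true_eq_false, if_false]
      rw [pvBest, pvBest_get?, pvFoldCmp_iff]
      simp only [PySem.Dict.get?_empty]
      constructor
      · rintro ⟨q, hq, h⟩
        rw [show q = (q.1, q.2) from rfl] at h
        rw [pvCheck_dy dy x y q.1 q.2 hdy] at h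
        obtain ⟨⟨hk1, hk2⟩, hside⟩ := h
        refine Or.inr ⟨q.2, ?_, hside⟩
        refine List.mem_map.mpr ⟨((PySem.Int.mod q.2 dy, q.1), q.2), ?_, rfl⟩
        refine List.mem_filter.mpr ⟨List.mem_map.mpr ⟨q, hq, rfl⟩, ?_⟩
        exact decide_eq_true (by rw [hk1, hk2])
      · rintro (⟨c, hc, -⟩ | ⟨c, hc, hside⟩)
        · exact absurd hc (by simp)
        · obtain ⟨kc, hkc, hc2⟩ := List.mem_map.mp hc
          obtain ⟨hkmem, hpred⟩ := List.mem_filter.mp hkc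
          obtain ⟨q, hq, hfq⟩ := List.mem_map.mp hkmem
          subst hfq
          have hkeq : (PySem.Int.mod q.2 dy, q.1) = (PySem.Int.mod y dy, x) := of_decide_eq_true hpred
          have hk1 : PySem.Int.mod q.2 dy = PySem.Int.mod y dy := congrArg Prod.fst hkeq
          have hk2 : q.1 = x := congrArg Prod.snd hkeq
          rw [← hc2] at hside
          refine ⟨q, hq, ?_⟩
          rw [show q = (q.1, q.2) from rfl, pvCheck_dy dy x y q.1 q.2 hdy]
          exact ⟨⟨hk1, hk2⟩, hside⟩
    · simp only [hdx, ne_eq, not_false_eq_true, if_true]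
      rw [pvBest, pvBest_get?, pvFoldCmp_iff]
      simp only [PySem.Dict.get?_empty]
      constructor
      · rintro ⟨q, hq, h⟩
        rw [show q = (q.1, q.2) from rfl] at h
        rw [pvCheck_dx dx dy x y q.1 q.2 hdx] at h
        obtain ⟨⟨hk1, hk2⟩, hside⟩ := h
        refine Or.inr ⟨q.1, ?_, hside⟩
        refine List.mem_map.mpr ⟨((PySem.Int.mod q.1 dx, dx * q.2 - dy * q.1), q.1), ?_, rfl⟩
        refine List.mem_filter.mpr ⟨List.mem_map.mpr ⟨q, hq, rfl⟩, ?_⟩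
        exact decide_eq_true (by rw [hk1, hk2])
      · rintro (⟨c, hc, -⟩ | ⟨c, hc, hside⟩)
        · exact absurd hc (by simp)
        · obtain ⟨kc, hkc, hc2⟩ := List.mem_map.mp hc
          obtain ⟨hkmem, hpred⟩ := List.mem_filter.mp hkc
          obtain ⟨q, hq, hfq⟩ := List.mem_map.mp hkmem
          subst hfq
          have hkeq : (PySem.Int.mod q.1 dx, dx * q.2 - dy * q.1) = (PySem.Int.mod x dx, dx * y - dy * x) :=
            of_decide_eq_true hpred
          have hk1 : PySem.Int.mod q.1 dx = PySem.Int.mod x dx := congrArg Prod.fst hkeq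
          have hk2 : dx * q.2 - dy * q.1 = dx * y - dy * x := congrArg Prod.snd hkeq
          rw [← hc2] at hside
          refine ⟨q, hq, ?_⟩
          rw [show q = (q.1, q.2) from rfl, pvCheck_dx dx dy x y q.1 q.2 hdx]
          exact ⟨⟨hk1, hk2⟩, hside⟩

-- ===== VERDICT (by name: the statement is the Claim_ definition above) =====
theorem can_reach_target_spec : Claim_equal_can_reach_target := by
  intro instructions x y _
  unfold Spec_can_reach_target
  exact pvMain instructions x y
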